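-- pv_equiv track=rewrite | github.com/520llw/csclip | labeling_tool/fewshot_biomedclip.py | _build_prompt_lookup
-- ===== SOURCE A (Python) =====
-- from typing import Any, Dict, List, Optional, Sequence, Tuple
--
-- def _build_prompt_lookup(
--     prompt_ensembles: Dict[int, List[str]],
-- ) -> Tuple[List[str], Dict[int, List[int]]]:
--     prompts: List[str] = []
--     class_prompt_indices: Dict[int, List[int]] = {}
--     for class_id in sorted(prompt_ensembles):
--         class_prompt_indices[class_id] = []
--         for prompt in prompt_ensembles[class_id]:
--             if not (prompt and prompt.strip()):
--                 continue
--             class_prompt_indices[class_id].append(len(prompts))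
--             prompts.append(prompt.strip())
--         if not class_prompt_indices[class_id]:
--             class_prompt_indices[class_id] = [len(prompts)]
--             prompts.append("a photomicrograph of a cell")
--     return prompts, class_prompt_indices
-- ===== SOURCE B (Python) =====
-- def _build_prompt_lookup(prompt_ensembles):
--     # Pass 1: cleaned prompt list per class (fallback if none survive).
--     cleaned = {}
--     for class_id in sorted(prompt_ensembles):
--         cs = [p.strip() for p in prompt_ensembles[class_id] if p and p.strip()]
--         cleaned[class_id] = cs if cs else ["a photomicrograph of a cell"]
--     # Pass 2: index ranges from cumulative lengths.
--     prompts = []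
--     class_prompt_indices = {}
--     offset = 0
--     for class_id, cs in cleaned.items():
--         class_prompt_indices[class_id] = list(range(offset, offset + len(cs)))
--         prompts.extend(cs)
--         offset += len(cs)
--     return prompts, class_prompt_indices
-- ===== Notes on version B (the rewrite author's own statement) =====
-- stated objective: alternative
-- what changed: A interleaves cleaning and numbering in one loop, reading len(prompts) inline at each append; B first materializes the cleaned (fallback-padded) prompt list per class, then assigns each class the index range [offset, offset+len) from a running offset and extends the flat list.
import Mathlib
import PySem

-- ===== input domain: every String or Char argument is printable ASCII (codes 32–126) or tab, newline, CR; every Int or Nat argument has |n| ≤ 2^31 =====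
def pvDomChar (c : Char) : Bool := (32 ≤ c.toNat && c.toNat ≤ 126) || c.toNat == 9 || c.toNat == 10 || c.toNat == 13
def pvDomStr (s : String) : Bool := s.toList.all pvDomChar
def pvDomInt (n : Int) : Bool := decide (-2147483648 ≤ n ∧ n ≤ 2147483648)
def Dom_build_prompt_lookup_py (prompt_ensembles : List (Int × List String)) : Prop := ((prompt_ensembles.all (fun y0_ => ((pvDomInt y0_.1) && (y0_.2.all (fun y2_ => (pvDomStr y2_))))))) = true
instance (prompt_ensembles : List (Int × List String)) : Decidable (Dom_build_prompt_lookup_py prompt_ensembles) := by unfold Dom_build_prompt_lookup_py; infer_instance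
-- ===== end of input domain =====

-- B replaces A's interleaved "append and read len() inline" loop by two passes: materialize the
-- cleaned per-class prompt lists first, then assign each class an index range from a running
-- offset (objective: alternative decomposition, same cost).

-- ===== PORT A =====
-- inner loop body: for prompt in prompt_ensembles[class_id]: …
def bpl_innerA (class_id : Int) (st : List String × PySem.Dict Int (List Int)) (prompt : String) :
    List String × PySem.Dict Int (List Int) :=
  if ¬(prompt ≠ "" ∧ PySem.Str.strip prompt ≠ "") then st
  else (st.1 ++ [PySem.Str.strip prompt],
        st.2.modify class_id [] (fun l => l ++ [(st.1.length : Int)]))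

-- outer loop body: one iteration of `for class_id in sorted(prompt_ensembles)`
def bpl_stepA (d : PySem.Dict Int (List String)) (st : List String × PySem.Dict Int (List Int))
    (class_id : Int) : List String × PySem.Dict Int (List Int) :=
  let st1 : List String × PySem.Dict Int (List Int) := (st.1, st.2.insert class_id ([] : List Int))
  let st2 := (d.getD class_id []).foldl (bpl_innerA class_id) st1
  if (st2.2.getD class_id []).isEmpty then
    (st2.1 ++ ["a photomicrograph of a cell"], st2.2.insert class_id [(st2.1.length : Int)])
  else st2

def build_prompt_lookup_py (prompt_ensembles : List (Int × List String)) :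
    List String × (List (Int × List Int)) :=
  let d := PySem.Dict.mk prompt_ensembles
  let st := (PySem.List.sorted d.keys (fun x => x) false).foldl (bpl_stepA d)
      ([], PySem.Dict.empty)
  (st.1, st.2.items)

-- ===== PORT B =====
-- [p.strip() for p in ps if p and p.strip()], with the fallback prompt if it comes out empty
def bpl_cleaned (ps : List String) : List String :=
  let cs := (ps.filter (fun p => decide (p ≠ "") && decide (PySem.Str.strip p ≠ ""))).map PySem.Str.strip
  if cs.isEmpty then ["a photomicrograph of a cell"] else cs

-- body of pass 2: extend prompts, assign the index range, advance the offset
def bpl_stepB (st : List String × PySem.Dict Int (List Int) × Int) (kv : Int × List String) :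
    List String × PySem.Dict Int (List Int) × Int :=
  (st.1 ++ kv.2,
   st.2.1.insert kv.1 (PySem.List.pyRange st.2.2 (st.2.2 + kv.2.length) 1),
   st.2.2 + kv.2.length)

def build_prompt_lookup_py_alt (prompt_ensembles : List (Int × List String)) :
    List String × (List (Int × List Int)) :=
  let d := PySem.Dict.mk prompt_ensembles
  -- pass 1: cleaned per-class lists in sorted key order
  let cleaned := (PySem.List.sorted d.keys (fun x => x) false).map
      (fun cid => (cid, bpl_cleaned (d.getD cid [])))
  -- pass 2: index ranges from cumulative lengths
  let st := cleaned.foldl bpl_stepB ([], PySem.Dict.empty, (0 : Int))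
  (st.1, st.2.1.items)

-- ===== PRECONDITION & SPEC =====
def Spec_build_prompt_lookup_py (prompt_ensembles : List (Int × List String)) (out : List String × (List (Int × List Int))) : Prop := out = build_prompt_lookup_py_alt prompt_ensembles
instance (prompt_ensembles : List (Int × List String)) (out : List String × (List (Int × List Int))) : Decidable (Spec_build_prompt_lookup_py prompt_ensembles out) := by unfold Spec_build_prompt_lookup_py; infer_instance

-- ===== CLAIM (what is proved, stated in full; the proofs are below) =====
def Claim_equal_build_prompt_lookup_py : Prop := ∀ (prompt_ensembles : List (Int × List String)), Dom_build_prompt_lookup_py prompt_ensembles → Spec_build_prompt_lookup_py prompt_ensembles (build_prompt_lookup_py prompt_ensembles)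

-- ===== LEMMAS AND PROOFS =====

theorem bpl_modify_insert (d : PySem.Dict Int (List Int)) (k : Int) (v d0 : List Int)
    (f : List Int → List Int) : (d.insert k v).modify k d0 f = d.insert k (f v) := by
  simp [PySem.Dict.modify, PySem.Dict.getD_insert_self, PySem.Dict.insert_insert_self]

theorem bpl_inner_eq (cid : Int) (ps : List String) :
    ∀ (prompts : List String) (cpi : PySem.Dict Int (List Int)) (idxs : List Int),
    ps.foldl (bpl_innerA cid) (prompts, cpi.insert cid idxs)
      = (prompts ++ ((ps.filter (fun p => decide (p ≠ "") && decide (PySem.Str.strip p ≠ ""))).map PySem.Str.strip),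
         cpi.insert cid (idxs ++
           (List.range ((ps.filter (fun p => decide (p ≠ "") && decide (PySem.Str.strip p ≠ ""))).length)).map
             (fun (k : Nat) => ((prompts.length : Int) + (k : Int))))) := by
  induction ps with
  | nil => intro prompts cpi idxs; simp
  | cons p ps ih =>
    intro prompts cpi idxs
    by_cases hp : p ≠ "" ∧ PySem.Str.strip p ≠ ""
    · have h1 : bpl_innerA cid (prompts, cpi.insert cid idxs) p
          = (prompts ++ [PySem.Str.strip p], cpi.insert cid (idxs ++ [(prompts.length : Int)])) := by
        simp [bpl_innerA, hp, bpl_modify_insert]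
      have hptrue : (decide (p ≠ "") && decide (PySem.Str.strip p ≠ "")) = true := by
        simp [hp.1, hp.2]
      rw [List.foldl_cons, h1, ih]
      simp only [List.filter_cons, hptrue, if_true, List.length_cons, List.range_succ_eq_map,
        List.map_cons, List.map_map, Prod.mk.injEq]
      refine ⟨by simp, ?_⟩
      congr 1
      rw [List.append_assoc]
      congr 1
      simp only [List.cons_append, List.nil_append, List.cons.injEq]
      refine ⟨by simp, ?_⟩
      apply List.map_congr_left
      intro k _
      simp [Function.comp, List.length_append]
      ring
    · have h1 : bpl_innerA cid (prompts, cpi.insert cid idxs) p = (prompts, cpi.insert cid idxs) := by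
        simp [bpl_innerA, hp]
      have hpfalse : (decide (p ≠ "") && decide (PySem.Str.strip p ≠ "")) = false := by
        simp only [Bool.and_eq_false_iff, decide_eq_false_iff_not]
        tauto
      rw [List.foldl_cons, h1, ih]
      simp only [List.filter_cons, hpfalse, Bool.false_eq_true, if_false]

theorem bpl_step_eq (d : PySem.Dict Int (List String)) (st : List String × PySem.Dict Int (List Int))
    (cid : Int) :
    bpl_stepA d st cid
      = (st.1 ++ bpl_cleaned (d.getD cid []),
         st.2.insert cid (PySem.List.pyRange (st.1.length : Int)
           ((st.1.length : Int) + ((bpl_cleaned (d.getD cid [])).length : Int)) 1)) := by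
  have hinner := bpl_inner_eq cid (d.getD cid []) st.1 st.2 []
  simp only [List.nil_append] at hinner
  unfold bpl_stepA
  simp only [hinner, PySem.Dict.getD_insert_self]
  by_cases hq : (List.filter (fun p => decide (p ≠ "") && decide (PySem.Str.strip p ≠ "")) (d.getD cid [])) = []
  · rw [hq]
    simp only [List.map_nil, List.length_nil, List.range_zero, List.append_nil, List.isEmpty_nil,
      if_true]
    rw [PySem.Dict.insert_insert_self]
    unfold bpl_cleaned
    rw [hq]
    simp only [List.map_nil, List.isEmpty_nil, if_true, Prod.mk.injEq]
    refine ⟨by simp, ?_⟩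
    congr 1
    rw [show ((st.1.length : Int) + (([("a photomicrograph of a cell" : String)].length : Nat) : Int))
          = (st.1.length : Int) + 1 by simp]
    rw [PySem.List.pyRange_one_singleton]
  · have hlen : (List.filter (fun p => decide (p ≠ "") && decide (PySem.Str.strip p ≠ "")) (d.getD cid [])).length ≠ 0 := by
      simpa [List.length_eq_zero_iff] using hq
    have hne : ((List.range ((List.filter (fun p => decide (p ≠ "") && decide (PySem.Str.strip p ≠ "")) (d.getD cid [])).length)).map
        (fun (k : Nat) => ((st.1.length : Int) + (k : Int)))).isEmpty = false := by
      simp only [List.isEmpty_eq_false_iff, ne_eq, List.map_eq_nil_iff, List.range_eq_nil]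
      exact hlen
    simp only [hne, Bool.false_eq_true, if_false]
    unfold bpl_cleaned
    have hcsne : ((List.filter (fun p => decide (p ≠ "") && decide (PySem.Str.strip p ≠ "")) (d.getD cid [])).map PySem.Str.strip).isEmpty = false := by
      simp only [List.isEmpty_eq_false_iff, ne_eq, List.map_eq_nil_iff]
      exact hq
    simp only [hcsne, Bool.false_eq_true, if_false, Prod.mk.injEq]
    refine ⟨trivial, ?_⟩
    congr 1
    rw [PySem.List.pyRange_one]
    have harg : (((st.1.length : Int) + (((List.filter (fun p => decide (p ≠ "") && decide (PySem.Str.strip p ≠ "")) (d.getD cid [])).map PySem.Str.strip).length : Int)) - (st.1.length : Int)).toNat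
        = (List.filter (fun p => decide (p ≠ "") && decide (PySem.Str.strip p ≠ "")) (d.getD cid [])).length := by
      simp only [List.length_map]
      omega
    rw [harg]

theorem bpl_fold_eq (d : PySem.Dict Int (List String)) (L : List Int) :
    ∀ (prompts : List String) (cpi : PySem.Dict Int (List Int)),
    (L.map (fun cid => (cid, bpl_cleaned (d.getD cid [])))).foldl bpl_stepB
        (prompts, cpi, (prompts.length : Int))
      = ((L.foldl (bpl_stepA d) (prompts, cpi)).1,
         (L.foldl (bpl_stepA d) (prompts, cpi)).2,
         (((L.foldl (bpl_stepA d) (prompts, cpi)).1.length : Int))) := by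
  induction L with
  | nil => intro prompts cpi; simp
  | cons cid L ih =>
    intro prompts cpi
    rw [List.map_cons, List.foldl_cons, List.foldl_cons]
    have hB : bpl_stepB (prompts, cpi, (prompts.length : Int)) (cid, bpl_cleaned (d.getD cid []))
        = (prompts ++ bpl_cleaned (d.getD cid []),
           cpi.insert cid (PySem.List.pyRange (prompts.length : Int)
             ((prompts.length : Int) + ((bpl_cleaned (d.getD cid [])).length : Int)) 1),
           ((prompts ++ bpl_cleaned (d.getD cid [])).length : Int)) := by
      unfold bpl_stepB
      simp only [Prod.mk.injEq]
      refine ⟨trivial, trivial, ?_⟩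
      simp [List.length_append]
    rw [hB, bpl_step_eq d (prompts, cpi) cid]
    exact ih (prompts ++ bpl_cleaned (d.getD cid [])) _

-- ===== VERDICT (by name: the statement is the Claim_ definition above) =====
theorem build_prompt_lookup_py_spec : Claim_equal_build_prompt_lookup_py := by
  intro pe _
  unfold Spec_build_prompt_lookup_py build_prompt_lookup_py build_prompt_lookup_py_alt
  simp only []
  rw [show ((0 : Int) = (([] : List String).length : Int)) by simp]
  rw [bpl_fold_eq]
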